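-- pv_equiv track=rewrite | github.com/0xcccccccccccc/tranhost-server | tran/models.py | avsplit
-- ===== SOURCE A (Python) =====
-- def avsplit(s, n):
--     fn = len(s)//n
--     rn = len(s)%n
--     sr = []
--     ix = 0
--     for i in range(n):
--         if i<rn:
--             sr.append(s[ix:ix+fn+1])
--             ix += fn+1
--         else:
--             sr.append(s[ix:ix+fn])
--             ix += fn
--     return sr
-- ===== SOURCE B (Python) =====
-- def avsplit(s, n):
--     fn, rn = len(s) // n, len(s) % n
--     return [s[i*fn + min(i, rn):(i+1)*fn + min(i+1, rn)] for i in range(n)]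
-- ===== Notes on version B (the rewrite author's own statement) =====
-- stated objective: simpler
-- what changed: Replaced the running-offset accumulator loop with its per-iteration branch by a single comprehension whose slice boundaries are computed in closed form from i via min(i, rn).
import Mathlib
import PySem

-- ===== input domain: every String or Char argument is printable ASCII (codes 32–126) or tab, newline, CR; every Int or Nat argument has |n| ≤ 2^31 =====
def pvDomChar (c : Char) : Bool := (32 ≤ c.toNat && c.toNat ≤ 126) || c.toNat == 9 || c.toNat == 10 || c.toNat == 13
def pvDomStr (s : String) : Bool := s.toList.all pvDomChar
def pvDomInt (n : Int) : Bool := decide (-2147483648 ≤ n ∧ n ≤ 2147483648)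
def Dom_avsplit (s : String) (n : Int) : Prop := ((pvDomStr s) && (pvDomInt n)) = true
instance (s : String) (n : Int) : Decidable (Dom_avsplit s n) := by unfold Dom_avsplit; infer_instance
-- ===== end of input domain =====

-- B replaces A's running-offset loop with per-iteration branch by closed-form slice
-- boundaries derived from the index (objective: simpler). Equivalence proved for n ≠ 0
-- (n = 0 raises ZeroDivisionError in Python).

-- ===== PORT A =====
def avsplit (s : String) (n : Int) : List String :=
  let fn := PySem.Int.floordiv (PySem.Str.len s) n
  let rn := PySem.Int.mod (PySem.Str.len s) n
  let res := (PySem.List.pyRange 0 n 1).foldl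
    (fun (st : List String × Int) i =>
      if i < rn then
        (st.1 ++ [PySem.Str.slice s (some st.2) (some (st.2 + fn + 1))], st.2 + fn + 1)
      else
        (st.1 ++ [PySem.Str.slice s (some st.2) (some (st.2 + fn))], st.2 + fn))
    ([], 0)
  res.1

-- ===== PORT B =====
def avsplit_alt (s : String) (n : Int) : List String :=
  let fn := PySem.Int.floordiv (PySem.Str.len s) n
  let rn := PySem.Int.mod (PySem.Str.len s) n
  (PySem.List.pyRange 0 n 1).map
    (fun i => PySem.Str.slice s (some (i * fn + min i rn)) (some ((i + 1) * fn + min (i + 1) rn)))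

-- ===== PRECONDITION & SPEC =====
-- Pre_ excludes exactly n = 0, where Python A raises ZeroDivisionError.
def Pre_avsplit (s : String) (n : Int) : Prop := n ≠ 0
instance (s : String) (n : Int) : Decidable (Pre_avsplit s n) := by unfold Pre_avsplit; infer_instance
def pvWitness_avsplit : String × Int := ("abcdefg", 3)

def Spec_avsplit (s : String) (n : Int) (out : List String) : Prop := out = avsplit_alt s n
instance (s : String) (n : Int) (out : List String) : Decidable (Spec_avsplit s n out) := by unfold Spec_avsplit; infer_instance

-- ===== CLAIM (what is proved, stated in full; the proofs are below) =====
def Claim_equal_avsplit : Prop := ∀ (s : String) (n : Int), Dom_avsplit s n → Pre_avsplit s n → Spec_avsplit s n (avsplit s n)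

-- ===== LEMMAS AND PROOFS =====

-- Loop invariant: starting from offset m*fn + min m rn with accumulator acc, A's fold over
-- pyRange m n 1 appends exactly B's closed-form slices for indices m..n-1.
lemma avsplit_loop (s : String) (fn rn n : Int) (hr : 0 ≤ rn) (hrn : rn < n) :
    ∀ (k : Nat) (m : Int) (acc : List String), 0 ≤ m → m + k = n →
      (PySem.List.pyRange m n 1).foldl
        (fun (st : List String × Int) i =>
          if i < rn then
            (st.1 ++ [PySem.Str.slice s (some st.2) (some (st.2 + fn + 1))], st.2 + fn + 1)
          else
            (st.1 ++ [PySem.Str.slice s (some st.2) (some (st.2 + fn))], st.2 + fn))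
        (acc, m * fn + min m rn)
      = (acc ++ (PySem.List.pyRange m n 1).map
          (fun i => PySem.Str.slice s (some (i * fn + min i rn))
                      (some ((i + 1) * fn + min (i + 1) rn))),
         n * fn + min n rn) := by
  intro k
  induction k with
  | zero =>
    intro m acc hm hk
    have hm' : m = n := by omega
    subst hm'
    rw [PySem.List.pyRange_one_eq_nil (le_refl _)]
    simp
  | succ k ih =>
    intro m acc hm hk
    have hmn : m < n := by omega
    rw [PySem.List.pyRange_one_cons hmn]
    simp only [List.foldl_cons, List.map_cons]
    by_cases hmr : m < rn
    · rw [if_pos hmr]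
      have h1 : min m rn = m := by omega
      have h2 : min (m + 1) rn = m + 1 := by omega
      have e1 : m * fn + min m rn + fn + 1 = (m + 1) * fn + min (m + 1) rn := by
        rw [h1, h2]; ring
      have e2 : m * fn + min m rn + (fn + 1) = (m + 1) * fn + min (m + 1) rn := by
        rw [h1, h2]; ring
      rw [e1]
      have := ih (m + 1) (acc ++ [PySem.Str.slice s (some (m * fn + min m rn))
                   (some ((m + 1) * fn + min (m + 1) rn))]) (by omega) (by omega)
      rw [this]
      simp
    · rw [if_neg hmr]
      have h1 : min m rn = rn := by omega
      have h2 : min (m + 1) rn = rn := by omega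
      have e1 : m * fn + min m rn + fn = (m + 1) * fn + min (m + 1) rn := by
        rw [h1, h2]; ring
      rw [e1]
      have := ih (m + 1) (acc ++ [PySem.Str.slice s (some (m * fn + min m rn))
                   (some ((m + 1) * fn + min (m + 1) rn))]) (by omega) (by omega)
      rw [this]
      simp

-- ===== VERDICT (by name: the statement is the Claim_ definition above) =====
theorem avsplit_spec : Claim_equal_avsplit := by
  intro s n _ hn
  unfold Spec_avsplit avsplit avsplit_alt
  by_cases hpos : 0 < n
  · set fn := PySem.Int.floordiv (PySem.Str.len s) n with hfn
    set rn := PySem.Int.mod (PySem.Str.len s) n with hrn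
    have hr : 0 ≤ rn := PySem.Int.mod_nonneg _ hpos
    have hlt : rn < n := PySem.Int.mod_lt _ hpos
    have h0 : (0 : Int) * fn + min 0 rn = 0 := by rw [min_eq_left hr]; ring
    have := avsplit_loop s fn rn n hr hlt n.toNat 0 [] (le_refl 0) (by omega)
    rw [h0] at this
    simp only [this]
    simp
  · have hneg : n < 0 := by unfold Pre_avsplit at hn; omega
    rw [PySem.List.pyRange_one_eq_nil (by omega : n ≤ 0)]
    simp
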